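-- pv_equiv track=rewrite | github.com/jcolinpatrick/kryptos | scripts/tableau/e_audit_05_tableau_column_keys.py | apply_cyclic_transposition
-- ===== SOURCE A (Python) =====
-- from typing import List, Tuple
--
-- def apply_cyclic_transposition(ct: str, perm: List[int]) -> str:
--     """Apply a transposition permutation cyclically to text.
--
--     For each block of len(perm) characters, apply the permutation.
--     output[perm[i]] = input[i] within each block (scatter convention).
--     Then invert to get gather convention: output[i] = input[inv_perm[i]].
--     """
--     n = len(perm)
--     # Invert permutation for gather
--     inv_perm = [0] * n
--     for i, p in enumerate(perm):
--         inv_perm[p] = i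
--
--     result = list(ct)
--     for block_start in range(0, len(ct), n):
--         block_end = min(block_start + n, len(ct))
--         block_len = block_end - block_start
--         block = ct[block_start:block_end]
--         for i in range(block_len):
--             if inv_perm[i] < block_len:
--                 result[block_start + i] = block[inv_perm[i]]
--     return "".join(result)
-- ===== SOURCE B (Python) =====
-- from typing import List
--
-- def apply_cyclic_transposition(ct: str, perm: List[int]) -> str:
--     """One flat gather pass: output position j takes its character from
--     k = block_base(j) + source[j % n], where source inverts perm; a source
--     that falls past the end of the text leaves position j unchanged."""
--     n = len(perm)
--     source = [0] * n
--     for i, p in enumerate(perm):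
--         source[p] = i
--     L = len(ct)
--
--     def pick(j):
--         k = j - j % n + source[j % n]
--         return ct[k] if k < L else ct[j]
--
--     return "".join(pick(j) for j in range(L))
-- ===== Notes on version B (the rewrite author's own statement) =====
-- stated objective: simpler
-- what changed: B replaces A's nested block loop that mutates a list copy of ct in place (slice out each block, scatter through the inverse table with a short-block guard) by a single flat gather pass over output positions: position j reads ct[j - j%n + source[j%n]] when that index is inside the text, else keeps ct[j]; no slicing, no mutation, no per-block bookkeeping.
import Mathlib
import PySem

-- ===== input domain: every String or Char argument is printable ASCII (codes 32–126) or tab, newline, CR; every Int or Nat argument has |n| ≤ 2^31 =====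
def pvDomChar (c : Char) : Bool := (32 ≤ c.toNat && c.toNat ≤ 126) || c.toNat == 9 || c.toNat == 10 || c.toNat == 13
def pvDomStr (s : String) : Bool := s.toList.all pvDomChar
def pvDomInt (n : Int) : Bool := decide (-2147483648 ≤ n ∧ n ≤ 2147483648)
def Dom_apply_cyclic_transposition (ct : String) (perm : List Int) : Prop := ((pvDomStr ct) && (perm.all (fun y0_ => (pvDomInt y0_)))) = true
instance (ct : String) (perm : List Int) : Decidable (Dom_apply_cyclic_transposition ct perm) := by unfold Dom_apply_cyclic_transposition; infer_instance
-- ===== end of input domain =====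

-- B replaces A's nested block loop with in-place mutation by a single flat gather pass over output positions (simpler decomposition; the inverse table is inherent to the semantics and kept).


-- ===== PORT A =====
def apply_cyclic_transposition (ct : String) (perm : List Int) : String :=
  let n : Int := perm.length
  -- inv_perm[p] = i for i, p in enumerate(perm); pySetD is Python-exact
  -- (negative indices wrap); Pre_ keeps every index in range, where Python raises
  let inv_perm : List Int :=
    (PySem.List.enumerate perm 0).foldl (fun acc ip => PySem.List.pySetD acc ip.2 ip.1)
      (List.replicate perm.length (0 : Int))
  let cs : List Char := ct.toList
  let result : List Char :=
    (PySem.List.pyRange 0 (cs.length : Int) n).foldl (fun res block_start =>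
      let block_end : Int := min (block_start + n) (cs.length : Int)
      let block_len : Int := block_end - block_start
      let block : List Char := PySem.List.slice cs (some block_start) (some block_end)
      (PySem.List.pyRange 0 block_len 1).foldl (fun res i =>
        let ip : Int := PySem.List.pyGetD inv_perm i 0
        if ip < block_len then
          PySem.List.pySetD res (block_start + i) (PySem.List.pyGetD block ip ' ')
        else res) res) cs
  String.ofList result

-- ===== PORT B =====
def apply_cyclic_transposition_alt (ct : String) (perm : List Int) : String :=
  let n : Int := perm.length
  -- source[p] = i for i, p in enumerate(perm); same Python-exact indexing as A's table
  let source : List Int :=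
    (PySem.List.enumerate perm 0).foldl (fun acc ip => PySem.List.pySetD acc ip.2 ip.1)
      (List.replicate perm.length (0 : Int))
  let cs : List Char := ct.toList
  let pick : Int → Char := fun j =>
    let k : Int := j - PySem.Int.mod j n + PySem.List.pyGetD source (PySem.Int.mod j n) 0
    if k < (cs.length : Int) then PySem.List.pyGetD cs k ' ' else PySem.List.pyGetD cs j ' '
  String.ofList ((PySem.List.pyRange 0 (cs.length : Int) 1).map pick)

-- ===== PRECONDITION & SPEC =====
-- Pre_ is exactly A's return domain: on an empty perm A raises ValueError (range step 0) and
-- on any entry outside [-len(perm), len(perm)) A raises IndexError while inverting; duplicate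
-- and negative in-range entries stay inside Pre_, and B reproduces A there.
def Pre_apply_cyclic_transposition (ct : String) (perm : List Int) : Prop :=
  perm ≠ [] ∧ ∀ p ∈ perm, -(perm.length : Int) ≤ p ∧ p < (perm.length : Int)
instance (ct : String) (perm : List Int) : Decidable (Pre_apply_cyclic_transposition ct perm) := by
  unfold Pre_apply_cyclic_transposition; infer_instance

def pvWitness_apply_cyclic_transposition : String × List Int := ("HELLOWORLD", [1, 2, 0])

def Spec_apply_cyclic_transposition (ct : String) (perm : List Int) (out : String) : Prop := out = apply_cyclic_transposition_alt ct perm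
instance (ct : String) (perm : List Int) (out : String) : Decidable (Spec_apply_cyclic_transposition ct perm out) := by unfold Spec_apply_cyclic_transposition; infer_instance

-- ===== CLAIM (what is proved, stated in full; the proofs are below) =====
def Claim_equal_apply_cyclic_transposition : Prop := ∀ (ct : String) (perm : List Int), Dom_apply_cyclic_transposition ct perm → Pre_apply_cyclic_transposition ct perm → Spec_apply_cyclic_transposition ct perm (apply_cyclic_transposition ct perm)

-- ===== LEMMAS AND PROOFS =====

-- A's inverse table, its per-block loop body and block image, and B's per-position
-- gather, named for the proofs (each is definitionally the corresponding piece of its port).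
def pvInv (perm : List Int) : List Int :=
  (PySem.List.enumerate perm 0).foldl (fun acc ip => PySem.List.pySetD acc ip.2 ip.1)
    (List.replicate perm.length (0 : Int))

def pvBodyA (perm : List Int) (cs : List Char) (res : List Char) (block_start : Int) : List Char :=
  let n : Int := perm.length
  let block_end : Int := min (block_start + n) (cs.length : Int)
  let block_len : Int := block_end - block_start
  let block : List Char := PySem.List.slice cs (some block_start) (some block_end)
  (PySem.List.pyRange 0 block_len 1).foldl (fun res i =>
    let ip : Int := PySem.List.pyGetD (pvInv perm) i 0
    if ip < block_len then
      PySem.List.pySetD res (block_start + i) (PySem.List.pyGetD block ip ' ')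
    else res) res

def pvG (perm : List Int) (cs : List Char) (bs : Int) : List Char :=
  let n : Int := perm.length
  let block : List Char := PySem.List.slice cs (some bs) (some (bs + n))
  let bl : Int := (block.length : Int)
  (PySem.List.pyRange 0 bl 1).map (fun i =>
    if PySem.List.pyGetD (pvInv perm) i 0 < bl then
      PySem.List.pyGetD block (PySem.List.pyGetD (pvInv perm) i 0) ' '
    else PySem.List.pyGetD block i ' ')

def pvF (perm : List Int) (cs : List Char) (j : Int) : Char :=
  let n : Int := perm.length
  let k : Int := j - PySem.Int.mod j n + PySem.List.pyGetD (pvInv perm) (PySem.Int.mod j n) 0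
  if k < (cs.length : Int) then PySem.List.pyGetD cs k ' ' else PySem.List.pyGetD cs j ' '

lemma pv_find?_unique {γ : Type} (l : List γ) (p : γ → Bool) (x : γ)
    (hx : x ∈ l) (hpx : p x = true) (hu : ∀ y ∈ l, p y = true → y = x) :
    l.find? p = some x := by
  induction l with
  | nil => simp at hx
  | cons a tl ih =>
    by_cases hpa : p a = true
    · rw [List.find?_cons_of_pos hpa]
      exact congrArg some (hu a (List.mem_cons_self ..) hpa)
    · rw [List.find?_cons_of_neg hpa]
      rcases List.mem_cons.mp hx with h | h
      · exact absurd (h ▸ hpx) hpa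
      · exact ih h (fun y hy => hu y (List.mem_cons_of_mem _ hy))

-- A fold of guarded single-cell writes with injective targets, read back pointwise.
lemma pv_scatter_get? {γ : Type} (idxs : List γ) (c : γ → Prop) [DecidablePred c]
    (t : γ → Int) (v : γ → Char) (res : List Char) (j : Nat)
    (ht : ∀ x ∈ idxs, c x → 0 ≤ t x)
    (hinj : ∀ x ∈ idxs, ∀ y ∈ idxs, c x → c y → t x = t y → x = y)
    (hnd : idxs.Nodup) :
    (idxs.foldl (fun r x => if c x then PySem.List.pySetD r (t x) (v x) else r) res)[j]?
      = match idxs.find? (fun x => decide (c x) && (t x == (j : Int))) with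
        | some x => if j < res.length then some (v x) else none
        | none => res[j]? := by
  induction idxs generalizing res with
  | nil => simp
  | cons x rest ih =>
    have hnd' := List.nodup_cons.mp hnd
    have htr : ∀ y ∈ rest, c y → 0 ≤ t y := fun y hy => ht y (List.mem_cons_of_mem _ hy)
    have hinjr : ∀ a ∈ rest, ∀ b ∈ rest, c a → c b → t a = t b → a = b :=
      fun a ha b hb => hinj a (List.mem_cons_of_mem _ ha) b (List.mem_cons_of_mem _ hb)
    simp only [List.foldl_cons]
    by_cases hcx : c x
    · have ht0 : 0 ≤ t x := ht x (List.mem_cons_self ..) hcx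
      rw [if_pos hcx, PySem.List.pySetD_of_nonneg _ _ ht0]
      by_cases htx : t x = (j : Int)
      · have hfr : rest.find? (fun y => decide (c y) && (t y == (j : Int))) = none := by
          rw [List.find?_eq_none]
          intro y hy hpy
          simp only [Bool.and_eq_true, decide_eq_true_eq, beq_iff_eq] at hpy
          have hxy : x = y := hinj x (List.mem_cons_self ..) y (List.mem_cons_of_mem _ hy)
            hcx hpy.1 (by rw [htx, hpy.2])
          exact hnd'.1 (hxy ▸ hy)
        rw [ih _ htr hinjr hnd'.2, hfr,
            List.find?_cons_of_pos (by simp [hcx, htx]), List.getElem?_set]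
        have hj : (t x).toNat = j := by omega
        rw [if_pos hj, hj]
      · rw [ih _ htr hinjr hnd'.2, List.find?_cons_of_neg (by simp [htx])]
        cases hfr : rest.find? (fun y => decide (c y) && (t y == (j : Int))) with
        | some y => simp
        | none =>
          have hne : (t x).toNat ≠ j := by omega
          simp [hne]
    · rw [if_neg hcx, ih _ htr hinjr hnd'.2, List.find?_cons_of_neg (by simp [hcx])]

lemma pv_foldl_len {γ δ : Type} (l : List γ) (f : List δ → γ → List δ)
    (h : ∀ r x, (f r x).length = r.length) (res : List δ) :
    (l.foldl f res).length = res.length := by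
  induction l generalizing res with
  | nil => rfl
  | cons x t ih => rw [List.foldl_cons, ih, h]

lemma pv_bodyA_len (perm : List Int) (cs res : List Char) (bs : Int) :
    (pvBodyA perm cs res bs).length = res.length := by
  unfold pvBodyA
  apply pv_foldl_len
  intro r x
  by_cases h : PySem.List.pyGetD (pvInv perm) x 0 <
      min (bs + (perm.length : Int)) (cs.length : Int) - bs
  · simp only [if_pos h, PySem.List.length_pySetD]
  · simp only [if_neg h]

-- Every element of a Python-exact single-cell write is the new value or an old element.
lemma pv_mem_pySetD {α : Type} (xs : List α) (p : Int) (v q : α)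
    (h : q ∈ PySem.List.pySetD xs p v) : q = v ∨ q ∈ xs := by
  unfold PySem.List.pySetD PySem.List.pySet? at h
  cases hidx : PySem.List.pyIdx? xs.length p with
  | none => rw [hidx] at h; simp only [Option.map_none, Option.getD_none] at h; exact Or.inr h
  | some m =>
    rw [hidx] at h
    simp only [Option.map_some, Option.getD_some] at h
    rcases List.mem_or_eq_of_mem_set h with h1 | h1
    · exact Or.inr h1
    · exact Or.inl h1

lemma pv_inv_len (perm : List Int) : (pvInv perm).length = perm.length := by
  unfold pvInv
  rw [pv_foldl_len _ _ (fun r x => PySem.List.length_pySetD ..)]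
  exact List.length_replicate

-- Every slot of A's inverse table holds a value in [0, n).
lemma pv_inv_bounds (perm : List Int) (hn : 0 < perm.length) :
    ∀ x ∈ pvInv perm, 0 ≤ x ∧ x < (perm.length : Int) := by
  have key : ∀ (l : List (Int × Int)) (acc : List Int),
      (∀ q ∈ l, 0 ≤ q.1 ∧ q.1 < (perm.length : Int)) →
      (∀ x ∈ acc, 0 ≤ x ∧ x < (perm.length : Int)) →
      ∀ x ∈ l.foldl (fun a ip => PySem.List.pySetD a ip.2 ip.1) acc,
        0 ≤ x ∧ x < (perm.length : Int) := by
    intro l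
    induction l with
    | nil => intro acc _ hacc; exact hacc
    | cons q tl ih =>
      intro acc hl hacc
      simp only [List.foldl_cons]
      apply ih _ (fun r hr => hl r (List.mem_cons_of_mem _ hr))
      intro x hx
      rcases pv_mem_pySetD _ _ _ _ hx with h1 | h1
      · exact h1 ▸ hl q (List.mem_cons_self ..)
      · exact hacc x h1
  apply key
  · intro q hq
    have : q.1 ∈ PySem.List.pyRange 0 (0 + (perm.length : Int)) 1 := by
      have := List.mem_map_of_mem (f := fun r : Int × Int => r.1) hq
      rwa [PySem.List.map_fst_enumerate] at this
    have := PySem.List.mem_pyRange_one.mp this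
    omega
  · intro x hx
    rw [List.eq_of_mem_replicate hx]
    omega

lemma pv_inv_get_bounds (perm : List Int) (i : Nat) (hi : i < perm.length) :
    0 ≤ PySem.List.pyGetD (pvInv perm) ((i : Nat) : Int) 0 ∧
      PySem.List.pyGetD (pvInv perm) ((i : Nat) : Int) 0 < (perm.length : Int) := by
  have hlen : i < (pvInv perm).length := by rw [pv_inv_len]; exact hi
  rw [PySem.List.pyGetD_natCast, List.getD_eq_getElem _ _ hlen]
  exact pv_inv_bounds perm (by omega) _ (List.getElem_mem hlen)

-- One block: A's in-place guarded gather on P ++ cs.drop k appends exactly the block image pvG.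
lemma pv_inner (perm : List Int) (cs : List Char)
    (k : Nat) (P : List Char) (hP : P.length = k) (hk : k < cs.length)
    (hn : 0 < perm.length) :
    pvBodyA perm cs (P ++ cs.drop k) (k : Int)
      = P ++ pvG perm cs (k : Int) ++ cs.drop (min (k + perm.length) cs.length) := by
  have hbl1 : 1 ≤ min (k + perm.length) cs.length - k := by omega
  set blN : Nat := min (k + perm.length) cs.length - k with hblN
  have hblle : blN ≤ perm.length := by omega
  have hkb : k + blN ≤ cs.length := by omega
  unfold pvBodyA pvG
  simp only []
  rw [show min ((k : Int) + (perm.length : Int)) (cs.length : Int) = ((k : Int) + (blN : Int)) by omega]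
  rw [show (k : Int) + (blN : Int) - (k : Int) = (blN : Int) by ring]
  rw [show ((k : Int) + (blN : Int)) = (((k + blN : Nat)) : Int) by push_cast [Nat.cast_add]; ring]
  rw [show PySem.List.slice cs (some ((k : Nat) : Int)) (some (((k + blN : Nat)) : Int))
      = List.take blN (List.drop k cs) from by
    rw [show (((k + blN : Nat)) : Int) = ((k : Nat) : Int) + ((blN : Nat) : Int) by push_cast; ring]
    exact PySem.List.slice_natCast_add cs k blN]
  rw [PySem.List.slice_natCast_add cs k perm.length]
  rw [show List.take perm.length (List.drop k cs) = List.take blN (List.drop k cs) from by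
    by_cases h : k + perm.length ≤ cs.length
    · rw [show blN = perm.length by omega]
    · rw [List.take_of_length_le (by simp; omega), List.take_of_length_le (by simp; omega)]]
  rw [show (((List.take blN (List.drop k cs)).length : Nat) : Int) = (blN : Int) from by
    rw [show (List.take blN (List.drop k cs)).length = blN from by simp; omega]]
  rw [PySem.List.pyRange_one]
  simp only [Int.sub_zero, Int.toNat_natCast, zero_add]
  rw [List.foldl_map, List.map_map]
  rw [show min (k + perm.length) cs.length = k + blN by omega]
  apply List.ext_getElem?
  intro j
  have hreslen : (P ++ List.drop k cs).length = cs.length := by simp [hP]; omega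
  refine (pv_scatter_get? (List.range blN)
      (fun i : Nat => PySem.List.pyGetD (pvInv perm) (↑i) 0 < (blN : Int))
      (fun i : Nat => ((k : Int) + (i : Int)))
      (fun i : Nat => PySem.List.pyGetD (List.take blN (List.drop k cs))
        (PySem.List.pyGetD (pvInv perm) (↑i) 0) ' ')
      (P ++ List.drop k cs) j
      (fun x _ _ => show (0 : Int) ≤ (k : Int) + (x : Int) by omega)
      (fun x _ y _ _ _ h => by
        have h' : (k : Int) + (x : Int) = (k : Int) + (y : Int) := h
        omega)
      List.nodup_range).trans ?_
  rw [List.append_assoc]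
  by_cases hjk : j < k
  · have hfn : (List.range blN).find?
        (fun i : Nat => decide (PySem.List.pyGetD (pvInv perm) (↑i) 0 < (blN : Int)) && (((k : Int) + (i : Int)) == (j : Int))) = none := by
      rw [List.find?_eq_none]
      intro y hy hpy
      simp only [Bool.and_eq_true, decide_eq_true_eq, beq_iff_eq] at hpy
      omega
    rw [hfn]
    simp only [List.getElem?_append, hP, if_pos hjk]
  · by_cases hjb : j < k + blN
    · have h2 : j - k < blN := by omega
      by_cases hc : PySem.List.pyGetD (pvInv perm) ((j - k : Nat) : Int) 0 < (blN : Int)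
      · have hfA : (List.range blN).find?
            (fun i : Nat => decide (PySem.List.pyGetD (pvInv perm) (↑i) 0 < (blN : Int)) && (((k : Int) + (i : Int)) == (j : Int))) = some (j - k) := by
          apply pv_find?_unique
          · exact List.mem_range.mpr h2
          · simp only [Bool.and_eq_true, decide_eq_true_eq, beq_iff_eq]
            exact ⟨hc, by omega⟩
          · intro y hy hpy
            simp only [Bool.and_eq_true, decide_eq_true_eq, beq_iff_eq] at hpy
            omega
        rw [hfA]
        simp only [List.getElem?_append, List.length_map, List.length_range, hP,
          if_neg hjk, if_pos h2, List.getElem?_map]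
        rw [hreslen, if_pos (by omega), List.getElem?_range h2]
        simp only [Option.map_some, Function.comp_apply]
        rw [if_pos hc]
      · have hfn : (List.range blN).find?
            (fun i : Nat => decide (PySem.List.pyGetD (pvInv perm) (↑i) 0 < (blN : Int)) && (((k : Int) + (i : Int)) == (j : Int))) = none := by
          rw [List.find?_eq_none]
          intro y hy hpy
          simp only [Bool.and_eq_true, decide_eq_true_eq, beq_iff_eq] at hpy
          have hy2 : y = j - k := by omega
          subst hy2
          exact hc hpy.1
        rw [hfn]
        simp only [List.getElem?_append, List.length_map, List.length_range, hP,
          if_neg hjk, if_pos h2, List.getElem?_map, List.getElem?_drop]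
        rw [List.getElem?_range h2]
        simp only [Option.map_some, Function.comp_apply]
        rw [if_neg hc]
        rw [PySem.List.pyGetD_ofNat _ (j - k) ' ' (by simp; omega)]
        rw [List.getElem_take, List.getElem_drop]
        exact List.getElem?_eq_getElem (by omega)
    · have hfn : (List.range blN).find?
          (fun i : Nat => decide (PySem.List.pyGetD (pvInv perm) (↑i) 0 < (blN : Int)) && (((k : Int) + (i : Int)) == (j : Int))) = none := by
        rw [List.find?_eq_none]
        intro y hy hpy
        have hy1 : y < blN := List.mem_range.mp hy
        simp only [Bool.and_eq_true, decide_eq_true_eq, beq_iff_eq] at hpy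
        omega
      rw [hfn]
      simp only [List.getElem?_append, List.length_map, List.length_range, hP,
        if_neg hjk, if_neg (show ¬ j - k < blN by omega), List.getElem?_drop]
      rw [show k + (j - k) = j by omega, show k + blN + (j - k - blN) = j by omega]

lemma pv_bodyA_noop (perm : List Int) (cs res : List Char) (bs : Int)
    (h : (cs.length : Int) ≤ bs) : pvBodyA perm cs res bs = res := by
  unfold pvBodyA
  simp only []
  rw [PySem.List.pyRange_one_eq_nil (by omega)]
  rfl

lemma pv_G_noop (perm : List Int) (cs : List Char) (bs : Int)
    (h : (cs.length : Int) ≤ bs) (hbs : 0 ≤ bs) : pvG perm cs bs = [] := by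
  unfold pvG
  simp only []
  rw [show PySem.List.slice cs (some bs) (some (bs + (perm.length : Int))) = [] from by
    rw [PySem.List.slice_toNat cs hbs (by omega), List.drop_eq_nil_of_le (by omega)]
    simp]
  simp [PySem.List.pyRange_one_eq_nil le_rfl]

-- All of A's blocks, by induction on the number of processed blocks.
lemma pv_outer (perm : List Int) (cs : List Char) (hn : 0 < perm.length) :
    ∀ m : Nat,
      ((List.range m).map (fun j : Nat => (0 : Int) + (perm.length : Int) * (j : Int))).foldl
          (pvBodyA perm cs) cs
        = ((List.range m).map (fun j : Nat => (0 : Int) + (perm.length : Int) * (j : Int))).flatMap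
            (pvG perm cs) ++ cs.drop (m * perm.length) := by
  intro m
  induction m with
  | zero => simp
  | succ m ih =>
    rw [List.range_succ, List.map_append, List.foldl_append, List.flatMap_append, ih]
    simp only [List.map_cons, List.map_nil, List.foldl_cons, List.foldl_nil,
      List.flatMap_cons, List.flatMap_nil, List.append_nil]
    rw [show (0 : Int) + (perm.length : Int) * (m : Int) = ((m * perm.length : Nat) : Int) by
      push_cast; ring]
    have hmul : (m + 1) * perm.length = m * perm.length + perm.length := by ring
    by_cases hk : m * perm.length < cs.length
    · have hPlen : (((List.range m).map (fun j : Nat => (0 : Int) + (perm.length : Int) * (j : Int))).flatMap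
          (pvG perm cs)).length = m * perm.length := by
        have hlf : (((List.range m).map (fun j : Nat => (0 : Int) + (perm.length : Int) * (j : Int))).foldl
            (pvBodyA perm cs) cs).length = cs.length :=
          pv_foldl_len _ _ (fun r x => pv_bodyA_len perm cs r x) cs
        have h2 := congrArg List.length ih
        rw [hlf] at h2
        simp only [List.length_append, List.length_drop] at h2
        omega
      rw [pv_inner perm cs (m * perm.length) _ hPlen hk hn]
      rw [List.append_assoc, List.append_assoc]
      congr 1
      congr 1
      by_cases h : (m + 1) * perm.length ≤ cs.length
      · congr 1
        omega
      · rw [List.drop_eq_nil_of_le (by omega), List.drop_eq_nil_of_le (by omega)]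
    · rw [pv_bodyA_noop perm cs _ _ (by omega),
          pv_G_noop perm cs _ (by omega) (Int.natCast_nonneg _)]
      rw [List.drop_eq_nil_of_le (by omega), List.drop_eq_nil_of_le (by omega)]
      simp

-- One block of B's flat pass is exactly the same block image pvG.
lemma pv_innerB (perm : List Int) (cs : List Char) (hn : 0 < perm.length)
    (m : Nat) (hmL : m * perm.length < cs.length) :
    (PySem.List.pyRange ((m * perm.length : Nat) : Int)
        ((min (m * perm.length + perm.length) cs.length : Nat) : Int) 1).map (pvF perm cs)
      = pvG perm cs ((m * perm.length : Nat) : Int) := by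
  set k : Nat := m * perm.length with hk
  have hbl1 : 1 ≤ min (k + perm.length) cs.length - k := by omega
  set blN : Nat := min (k + perm.length) cs.length - k with hblN
  have hble : blN ≤ perm.length := by omega
  have hkb : k + blN ≤ cs.length := by omega
  have halt : blN = perm.length ∨ k + blN = cs.length := by omega
  have hmin : min (k + perm.length) cs.length = k + blN := by omega
  rw [hmin]
  unfold pvG
  simp only []
  rw [PySem.List.slice_natCast_add cs k perm.length]
  have hblock : (List.take perm.length (List.drop k cs)).length = blN := by simp; omega
  rw [hblock]
  apply List.ext_getElem
  · simp only [List.length_map, PySem.List.length_pyRange_one]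
    omega
  · intro q hq1 hq2
    have hqb : q < blN := by
      simp only [List.length_map, PySem.List.length_pyRange_one] at hq1
      omega
    simp only [List.getElem_map, PySem.List.getElem_pyRange_one]
    have hmod : PySem.Int.mod (((k : Nat) : Int) + (q : Int)) ((perm.length : Nat) : Int)
        = (q : Int) := by
      rw [PySem.Int.mod_eq_emod_of_pos (by omega),
          show ((m * perm.length : Nat) : Int) + (q : Int)
            = (q : Int) + (m : Int) * (perm.length : Int) by push_cast; ring,
          Int.add_mul_emod_self_right]
      exact Int.emod_eq_of_lt (by omega) (by omega)
    unfold pvF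
    simp only []
    rw [hmod, show (0 : Int) + (q : Int) = ((q : Nat) : Int) by ring]
    obtain ⟨hs0, hs1⟩ := pv_inv_get_bounds perm q (by omega)
    set s : Int := PySem.List.pyGetD (pvInv perm) ((q : Nat) : Int) 0 with hs
    rw [show ((k : Nat) : Int) + (q : Int) - (q : Int) + s = ((k : Nat) : Int) + s by ring]
    by_cases hcond : s < ((blN : Nat) : Int)
    · rw [if_pos (by omega : ((k : Nat) : Int) + s < (cs.length : Int)), if_pos hcond]
      rw [show s = ((s.toNat : Nat) : Int) by omega,
          show ((k : Nat) : Int) + ((s.toNat : Nat) : Int) = ((k + s.toNat : Nat) : Int) by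
            push_cast; ring,
          PySem.List.pyGetD_natCast, PySem.List.pyGetD_natCast,
          List.getD_eq_getElem _ _ (show k + s.toNat < cs.length by omega),
          List.getD_eq_getElem _ _ (by rw [hblock]; omega),
          List.getElem_take, List.getElem_drop]
    · rw [if_neg (by omega : ¬ ((k : Nat) : Int) + s < (cs.length : Int)), if_neg hcond]
      rw [show ((k : Nat) : Int) + (q : Int) = ((k + q : Nat) : Int) by push_cast; ring,
          PySem.List.pyGetD_natCast, PySem.List.pyGetD_natCast,
          List.getD_eq_getElem _ _ (show k + q < cs.length by omega),
          List.getD_eq_getElem _ _ (by rw [hblock]; omega),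
          List.getElem_take, List.getElem_drop]

-- All of B's positions, grouped into the same blocks.
lemma pv_outerB (perm : List Int) (cs : List Char) (hn : 0 < perm.length) :
    ∀ m : Nat,
      (PySem.List.pyRange 0 (cs.length : Int) 1).map (pvF perm cs)
        = ((List.range m).map (fun j : Nat => (0 : Int) + (perm.length : Int) * (j : Int))).flatMap
            (pvG perm cs) ++
          (PySem.List.pyRange ((m * perm.length : Nat) : Int) (cs.length : Int) 1).map (pvF perm cs) := by
  intro m
  induction m with
  | zero => simp
  | succ m ih =>
    rw [ih, List.range_succ, List.map_append, List.flatMap_append, List.append_assoc]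
    congr 1
    simp only [List.map_cons, List.map_nil, List.flatMap_cons, List.flatMap_nil, List.append_nil]
    rw [show (0 : Int) + (perm.length : Int) * (m : Int) = ((m * perm.length : Nat) : Int) by
      push_cast; ring]
    have hmul : (m + 1) * perm.length = m * perm.length + perm.length := by ring
    by_cases hk : m * perm.length < cs.length
    · rw [PySem.List.pyRange_one_append ((m * perm.length : Nat) : Int)
          ((min (m * perm.length + perm.length) cs.length : Nat) : Int) (cs.length : Int)
          (by omega) (by omega), List.map_append]
      congr 1
      · exact pv_innerB perm cs hn m hk
      · by_cases h2 : m * perm.length + perm.length ≤ cs.length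
        · rw [show min (m * perm.length + perm.length) cs.length = (m + 1) * perm.length by omega]
        · rw [show ((min (m * perm.length + perm.length) cs.length : Nat) : Int)
              = (cs.length : Int) by omega,
              PySem.List.pyRange_one_eq_nil (le_refl (cs.length : Int)),
              PySem.List.pyRange_one_eq_nil
                (by omega : (cs.length : Int) ≤ (((m + 1) * perm.length : Nat) : Int))]
    · rw [PySem.List.pyRange_one_eq_nil (by omega),
          pv_G_noop perm cs _ (by omega) (Int.natCast_nonneg _),
          PySem.List.pyRange_one_eq_nil
            (by omega : (cs.length : Int) ≤ (((m + 1) * perm.length : Nat) : Int))]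
      simp

-- ===== VERDICT (by name: the statement is the Claim_ definition above) =====
theorem apply_cyclic_transposition_spec : Claim_equal_apply_cyclic_transposition := by
  intro ct perm _ hpre
  obtain ⟨hne, hb⟩ := hpre
  have hn : 0 < perm.length := by
    cases perm with
    | nil => exact absurd rfl hne
    | cons a t => simp
  have hN : (0 : Int) < (perm.length : Int) := by omega
  unfold Spec_apply_cyclic_transposition
  show String.ofList
      ((PySem.List.pyRange 0 (ct.toList.length : Int) (perm.length : Int)).foldl
        (pvBodyA perm ct.toList) ct.toList)
    = String.ofList
      ((PySem.List.pyRange 0 (ct.toList.length : Int) 1).map (pvF perm ct.toList))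
  apply congrArg String.ofList
  rw [PySem.List.pyRange_of_pos _ _ hN]
  by_cases hL : ct.toList.length = 0
  · rw [if_neg (by omega)]
    rw [show ((ct.toList.length : Nat) : Int) = ((0 : Nat) : Int) by omega,
        PySem.List.pyRange_one_eq_nil (by omega)]
    simp [List.eq_nil_of_length_eq_zero hL]
  · rw [if_pos (by omega)]
    set M : Nat := (((ct.toList.length : Int) - 0 + (perm.length : Int) - 1) / (perm.length : Int)).toNat with hM
    have hq0 : 0 ≤ ((ct.toList.length : Int) - 0 + (perm.length : Int) - 1) / (perm.length : Int) :=
      Int.ediv_nonneg (by omega) (by omega)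
    have h5 := Int.mul_ediv_add_emod ((ct.toList.length : Int) - 0 + (perm.length : Int) - 1)
      (perm.length : Int)
    have h6 := Int.emod_nonneg ((ct.toList.length : Int) - 0 + (perm.length : Int) - 1)
      (show (perm.length : Int) ≠ 0 by omega)
    have h7 := Int.emod_lt_of_pos ((ct.toList.length : Int) - 0 + (perm.length : Int) - 1) hN
    have hq : (ct.toList.length : Int) ≤ (perm.length : Int) *
        (((ct.toList.length : Int) - 0 + (perm.length : Int) - 1) / (perm.length : Int)) := by
      omega
    have hcast : ((M * perm.length : Nat) : Int) = (perm.length : Int) *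
        (((ct.toList.length : Int) - 0 + (perm.length : Int) - 1) / (perm.length : Int)) := by
      rw [Nat.cast_mul, hM, Int.toNat_of_nonneg hq0]
      ring
    have hLM : ct.toList.length ≤ M * perm.length := by omega
    rw [pv_outer perm ct.toList hn M, pv_outerB perm ct.toList hn M]
    rw [List.drop_eq_nil_of_le hLM,
        PySem.List.pyRange_one_eq_nil (by omega : (ct.toList.length : Int) ≤ ((M * perm.length : Nat) : Int))]
    simp
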